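-- pv_equiv track=rewrite | github.com/ericwang094/python_notes | leetcode/leetcode/extra/数组小和.py | getSmallSum
-- ===== SOURCE A (Python) =====
-- from typing import List
--
-- def getSmallSum(arr: List[int]) -> int:
--     def mergeSort(arr: List[int], start: int, end: int) -> int:
--         if start == end:
--             return 0
--         mid = (start + end) // 2
--         return mergeSort(arr, start, mid) + mergeSort(arr, mid + 1, end) + merge(arr, start, mid, end)
--
--     def merge(arr: List[int], start: int, mid: int, end: int) -> int:
--         left = start
--         right = mid + 1
--         res = []
--         sum = 0
--         while left <= mid and right <= end:
--             if arr[left] < arr[right]: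
--                 res.append(arr[left])
--                 sum += arr[left] * (end - right + 1)
--                 left += 1
--             else:
--                 res.append(arr[right])
--                 right += 1
--         res += arr[left: mid + 1]
--         res += arr[right: end + 1]
--         arr[start: end + 1] = res
--         return sum
--
--     if arr == None or len(arr) == 0:
--         return 0
--
--     return mergeSort(arr, 0, len(arr) - 1)
-- ===== SOURCE B (Python) =====
-- from typing import List
--
-- def getSmallSum(arr: List[int]) -> int:
--     # Direct one-pass accumulation: for each element, add the sum of the
--     # strictly smaller elements seen before it.  (Return value only: unlike
--     # the merge-sort version, this does not sort arr in place.)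
--     if arr is None or len(arr) == 0:
--         return 0
--     total = 0
--     seen = []
--     for y in arr:
--         total += sum(x for x in seen if x < y)
--         seen.append(y)
--     return total
-- ===== Notes on version B (the rewrite author's own statement) =====
-- stated objective: simpler
-- what changed: Replaces the recursive in-place merge sort that accumulates the small sum during merges with a direct one-pass loop that, for each element, adds the sum of the strictly smaller elements already seen (return value only: A also sorts arr in place, B does not mutate it).
import Mathlib
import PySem

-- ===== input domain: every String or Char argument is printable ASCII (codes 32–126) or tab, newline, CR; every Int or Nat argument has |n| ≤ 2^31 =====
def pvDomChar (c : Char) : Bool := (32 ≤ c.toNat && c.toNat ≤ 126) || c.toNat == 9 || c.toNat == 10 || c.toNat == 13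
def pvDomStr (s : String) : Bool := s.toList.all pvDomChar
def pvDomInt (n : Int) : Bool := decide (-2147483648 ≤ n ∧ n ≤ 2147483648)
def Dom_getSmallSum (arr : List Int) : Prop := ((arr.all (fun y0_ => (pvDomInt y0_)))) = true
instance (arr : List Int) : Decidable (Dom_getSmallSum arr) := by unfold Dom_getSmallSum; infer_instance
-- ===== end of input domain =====

-- B replaces A's recursive merge sort by a direct one-pass accumulation over the
-- list (sum of strictly smaller earlier elements); equivalence is about the
-- RETURN value only — Python A additionally sorts arr in place, B does not.

-- ===== PORT A =====
-- A's `merge` on the segment pair: the while loop becomes the structural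
-- recursion over the two runs; `end - right + 1` is the length of the
-- remaining right run, here `r.length + 1`.
def mergeA : List Int → List Int → List Int × Int
  | l, [] => (l, 0)
  | [], b :: r => (b :: r, 0)
  | a :: l, b :: r =>
    if a < b then
      let p := mergeA l (b :: r)
      (a :: p.1, p.2 + a * ((r.length : Int) + 1))
    else
      let p := mergeA (a :: l) r
      (b :: p.1, p.2)
  termination_by l r => l.length + r.length

-- A's `mergeSort(arr, start, end)` acts only on the segment arr[start..end];
-- it is transliterated over that segment: mid = (start+end)//2 makes the left
-- part have ⌈n/2⌉ elements, i.e. take/drop at (n+1)/2.  The pair returns the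
-- mutated segment together with the accumulated sum.
def msortA (l : List Int) : List Int × Int :=
  if _h : l.length ≤ 1 then (l, 0)             -- Python base case start == end
  else
    let k := (l.length + 1) / 2
    let p1 := msortA (l.take k)
    let p2 := msortA (l.drop k)
    let m := mergeA p1.1 p2.1
    (m.1, p1.2 + p2.2 + m.2)
  termination_by l.length
  decreasing_by
    · simp only [List.length_take]; omega
    · simp only [List.length_drop]; omega

def getSmallSum (arr : List Int) : Int :=
  if arr = [] then 0 else (msortA arr).2

-- ===== PORT B =====
def getSmallSum_alt (arr : List Int) : Int :=
  if arr = [] then 0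
  else
    (arr.foldl
      (fun (st : Int × List Int) y =>
        (st.1 + ((st.2.filter (fun x => x < y)).sum), st.2 ++ [y]))
      (0, ([] : List Int))).1

-- ===== PRECONDITION & SPEC =====
def Spec_getSmallSum (arr : List Int) (out : Int) : Prop := out = getSmallSum_alt arr
instance (arr : List Int) (out : Int) : Decidable (Spec_getSmallSum arr out) := by unfold Spec_getSmallSum; infer_instance

-- ===== CLAIM (what is proved, stated in full; the proofs are below) =====
def Claim_equal_getSmallSum : Prop := ∀ (arr : List Int), Dom_getSmallSum arr → Spec_getSmallSum arr (getSmallSum arr)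

-- ===== LEMMAS AND PROOFS =====

-- crossS L R = Σ_{x ∈ L} x · |{y ∈ R : x < y}|  (the cross "small sum" of two runs)
def crossS (L R : List Int) : Int :=
  (L.map (fun x => x * ((R.countP (fun y => decide (x < y)) : Nat) : Int))).sum

-- pairSum l = Σ_{i<j, l[i]<l[j]} l[i]  (the mathematical small sum)
def pairSum : List Int → Int
  | [] => 0
  | x :: t => crossS [x] t + pairSum t

theorem crossS_nil_left (R : List Int) : crossS [] R = 0 := rfl

theorem crossS_nil_right (L : List Int) : crossS L [] = 0 := by
  induction L with
  | nil => rfl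
  | cons a L _ => simp [crossS]

theorem crossS_cons_left (a : Int) (L R : List Int) :
    crossS (a :: L) R = a * ((R.countP (fun y => decide (a < y)) : Nat) : Int) + crossS L R := by
  simp [crossS]

theorem crossS_append_left (L1 L2 R : List Int) :
    crossS (L1 ++ L2) R = crossS L1 R + crossS L2 R := by
  simp [crossS]

theorem crossS_append_right (L R1 R2 : List Int) :
    crossS L (R1 ++ R2) = crossS L R1 + crossS L R2 := by
  induction L with
  | nil => simp [crossS]
  | cons a L ih =>
    simp only [crossS_cons_left, List.countP_append, ih]
    push_cast
    ring

theorem crossS_filter (pre : List Int) (y : Int) :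
    crossS pre [y] = (pre.filter (fun x => decide (x < y))).sum := by
  induction pre with
  | nil => rfl
  | cons a pre ih =>
    rw [crossS_cons_left, ih, List.filter_cons]
    by_cases h : a < y <;>
      simp [List.countP_nil, h]

theorem crossS_perm_left {L L' : List Int} (R : List Int) (h : L.Perm L') :
    crossS L R = crossS L' R :=
  List.Perm.sum_eq (h.map _)

theorem crossS_perm_right (L : List Int) {R R' : List Int} (h : R.Perm R') :
    crossS L R = crossS L R' := by
  simp [crossS, h.countP_eq]

theorem pairSum_append (L R : List Int) :
    pairSum (L ++ R) = pairSum L + pairSum R + crossS L R := by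
  induction L with
  | nil => simp [pairSum, crossS_nil_left]
  | cons x L ih =>
    simp only [List.cons_append, pairSum, ih, crossS_append_right,
      crossS_cons_left, crossS_nil_left]
    ring

theorem mergeA_perm (L R : List Int) : (mergeA L R).1.Perm (L ++ R) := by
  fun_induction mergeA L R with
  | case1 l => simp
  | case2 b r => simp
  | case3 a l b r h p ih =>
    exact (ih.cons a)
  | case4 a l b r h p ih =>
    exact (ih.cons b).trans List.perm_middle.symm

theorem mergeA_sorted (L R : List Int) :
    L.Pairwise (· ≤ ·) → R.Pairwise (· ≤ ·) → (mergeA L R).1.Pairwise (· ≤ ·) := by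
  fun_induction mergeA L R with
  | case1 l => intro hL _; exact hL
  | case2 b r => intro _ hR; exact hR
  | case3 a l b r h p ih =>
    intro hL hR
    refine List.Pairwise.cons ?_ (ih (List.pairwise_cons.mp hL).2 hR)
    intro y hy
    rcases List.mem_append.mp ((mergeA_perm l (b :: r)).mem_iff.mp hy) with hy | hy
    · exact (List.pairwise_cons.mp hL).1 y hy
    · rcases List.mem_cons.mp hy with rfl | hy
      · exact le_of_lt h
      · exact le_of_lt (lt_of_lt_of_le h ((List.pairwise_cons.mp hR).1 y hy))
  | case4 a l b r h p ih =>
    intro hL hR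
    refine List.Pairwise.cons ?_ (ih hL (List.pairwise_cons.mp hR).2)
    intro y hy
    have hba : b ≤ a := le_of_not_gt h
    rcases List.mem_append.mp ((mergeA_perm (a :: l) r).mem_iff.mp hy) with hy | hy
    · rcases List.mem_cons.mp hy with rfl | hy
      · exact hba
      · exact hba.trans ((List.pairwise_cons.mp hL).1 y hy)
    · exact (List.pairwise_cons.mp hR).1 y hy

theorem crossS_single_zero {L : List Int} {b : Int} (h : ∀ x ∈ L, ¬ x < b) :
    crossS L [b] = 0 := by
  induction L with
  | nil => rfl
  | cons a L ih =>
    rw [crossS_cons_left, ih (fun x hx => h x (List.mem_cons_of_mem a hx))]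
    simp [List.countP_nil, h a (List.mem_cons_self ..)]

theorem mergeA_sum (L R : List Int) :
    L.Pairwise (· ≤ ·) → R.Pairwise (· ≤ ·) → (mergeA L R).2 = crossS L R := by
  fun_induction mergeA L R with
  | case1 l => intro _ _; rw [crossS_nil_right]
  | case2 b r => intro _ _; rfl
  | case3 a l b r h p ih =>
    intro hL hR
    rw [ih (List.pairwise_cons.mp hL).2 hR, crossS_cons_left]
    have hcnt : (b :: r).countP (fun y => decide (a < y)) = (b :: r).length := by
      refine List.countP_eq_length.mpr ?_
      intro y hy
      rcases List.mem_cons.mp hy with rfl | hy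
      · exact decide_eq_true h
      · exact decide_eq_true (lt_of_lt_of_le h ((List.pairwise_cons.mp hR).1 y hy))
    rw [hcnt]
    simp only [List.length_cons]
    push_cast
    ring
  | case4 a l b r h p ih =>
    intro hL hR
    rw [ih hL (List.pairwise_cons.mp hR).2]
    have : crossS (a :: l) (b :: r) = crossS (a :: l) [b] + crossS (a :: l) r :=
      crossS_append_right (a :: l) [b] r
    rw [this, crossS_single_zero, zero_add]
    intro x hx
    have hba : b ≤ a := le_of_not_gt h
    rcases List.mem_cons.mp hx with rfl | hx
    · exact h
    · exact not_lt_of_ge (hba.trans ((List.pairwise_cons.mp hL).1 x hx))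

theorem msortA_spec (l : List Int) :
    (msortA l).1.Perm l ∧ (msortA l).1.Pairwise (· ≤ ·) ∧ (msortA l).2 = pairSum l := by
  fun_induction msortA l with
  | case1 l h =>
    refine ⟨List.Perm.refl l, ?_, ?_⟩
    · match l, h with
      | [], _ => exact List.Pairwise.nil
      | [a], _ => exact List.pairwise_singleton _ a
    · match l, h with
      | [], _ => rfl
      | [a], _ =>
        show (0 : Int) = pairSum [a]
        simp [pairSum, crossS_nil_right]
  | case2 l h k p1 p2 m ih1 ih2 =>
    obtain ⟨hp1, hs1, hv1⟩ := ih1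
    obtain ⟨hp2, hs2, hv2⟩ := ih2
    have hmp : m.1.Perm (p1.1 ++ p2.1) := mergeA_perm p1.1 p2.1
    have hperm : m.1.Perm l := by
      refine hmp.trans ?_
      calc (p1.1 ++ p2.1).Perm (l.take k ++ l.drop k) := hp1.append hp2
        _ = l := l.take_append_drop k
    refine ⟨hperm, mergeA_sorted _ _ hs1 hs2, ?_⟩
    show p1.2 + p2.2 + m.2 = pairSum l
    rw [hv1, hv2, mergeA_sum _ _ hs1 hs2]
    have hc : crossS p1.1 p2.1 = crossS (l.take k) (l.drop k) := by
      rw [crossS_perm_left _ hp1, crossS_perm_right _ hp2]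
    rw [hc]
    conv_rhs => rw [← l.take_append_drop k]
    rw [pairSum_append]

theorem foldl_B (l : List Int) (t : Int) (pre : List Int) :
    (l.foldl
      (fun (st : Int × List Int) y =>
        (st.1 + ((st.2.filter (fun x => x < y)).sum), st.2 ++ [y]))
      (t, pre)).1 = t + crossS pre l + pairSum l := by
  induction l generalizing t pre with
  | nil => simp [pairSum, crossS_nil_right]
  | cons y l ih =>
    simp only [List.foldl_cons, ih]
    have h1 : crossS pre (y :: l) = crossS pre [y] + crossS pre l :=
      crossS_append_right pre [y] l
    have h2 : crossS (pre ++ [y]) l = crossS pre l + crossS [y] l :=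
      crossS_append_left pre [y] l
    rw [h1, h2, crossS_filter]
    show _ = t + ((List.filter (fun x => decide (x < y)) pre).sum + crossS pre l) + (crossS [y] l + pairSum l)
    ring

-- ===== VERDICT (by name: the statement is the Claim_ definition above) =====
theorem getSmallSum_spec : Claim_equal_getSmallSum := by
  intro arr _
  show getSmallSum arr = getSmallSum_alt arr
  unfold getSmallSum getSmallSum_alt
  by_cases h : arr = []
  · simp [h]
  · rw [if_neg h, if_neg h, (msortA_spec arr).2.2, foldl_B, crossS_nil_left]
    ring
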